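-- pv_equiv track=rewrite | github.com/D1egoSebastian/codeDeadants | deadants.py | antsfunction
-- ===== SOURCE A (Python) =====
-- def antsfunction(ants):
--
--   a_count = 0
--   n_count = 0
--   t_count = 0
--   ant_count = 0
--
--   for i in range(len(ants)):
--
--     if ants[i] == 'a' and (i >= len(ants)-2 or ants[i+1:i+3] != 'nt'):
--       a_count += 1
--
--     elif ants[i] == 'n' and (i >= len(ants)-2 or ants[i+1:i+3] != 'ta'):
--       n_count += 1
--
--     elif ants[i] == 't' and (i >= len(ants)-1 or ants[i+1] != 'a'):
--       t_count += 1
--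
--     elif i < len(ants)-2 and ants[i:i+3] == 'ant':
--       ant_count += 1
--
--   count = max(a_count, n_count, t_count) - ant_count
--
--   return count
-- ===== SOURCE B (Python) =====
-- def antsfunction(ants):
--   ant = ants.count('ant')
--   a = ants.count('a') - ant
--   n = ants.count('n') - ants.count('nta')
--   t = ants.count('t') - ants.count('ta')
--   return max(a, n, t) - ant
-- ===== Notes on version B (the rewrite author's own statement) =====
-- stated objective: simpler
-- what changed: Replaces the index loop with per-branch lookahead guards by four str.count tallies (each branch of A counts occurrences of a fixed substring minus its excluded continuation), then takes the same max.
import Mathlib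
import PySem

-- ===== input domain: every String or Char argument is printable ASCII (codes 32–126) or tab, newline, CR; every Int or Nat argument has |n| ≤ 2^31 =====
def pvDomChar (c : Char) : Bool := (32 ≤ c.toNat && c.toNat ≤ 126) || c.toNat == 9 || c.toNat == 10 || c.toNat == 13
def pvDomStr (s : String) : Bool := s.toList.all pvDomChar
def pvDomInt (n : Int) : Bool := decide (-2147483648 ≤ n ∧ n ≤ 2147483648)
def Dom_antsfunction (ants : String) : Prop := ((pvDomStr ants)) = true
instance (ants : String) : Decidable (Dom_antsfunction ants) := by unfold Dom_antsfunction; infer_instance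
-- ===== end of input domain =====

-- B replaces A's index loop (per-character lookahead guards) by four substring tallies via str.count; objective: simpler.

-- ===== PORT A =====
-- literal port of A's loop: for each i in range(len), an if/elif chain on ants[i] and the
-- lookahead slices; pyGetD's default is never used (i, and i+1 under its guard, are in range).
def antsfunction (ants : String) : Int :=
  let s := ants.toList
  let st := (PySem.List.pyRange 0 (s.length : Int)).foldl
    (fun (st : Int × Int × Int × Int) i =>
      if PySem.List.pyGetD s i ' ' = 'a' ∧
         (i ≥ (s.length : Int) - 2 ∨ PySem.List.slice s (some (i+1)) (some (i+3)) ≠ ['n','t']) then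
        (st.1 + 1, st.2.1, st.2.2.1, st.2.2.2)
      else if PySem.List.pyGetD s i ' ' = 'n' ∧
         (i ≥ (s.length : Int) - 2 ∨ PySem.List.slice s (some (i+1)) (some (i+3)) ≠ ['t','a']) then
        (st.1, st.2.1 + 1, st.2.2.1, st.2.2.2)
      else if PySem.List.pyGetD s i ' ' = 't' ∧
         (i ≥ (s.length : Int) - 1 ∨ PySem.List.pyGetD s (i+1) ' ' ≠ 'a') then
        (st.1, st.2.1, st.2.2.1 + 1, st.2.2.2)
      else if i < (s.length : Int) - 2 ∧ PySem.List.slice s (some i) (some (i+3)) = ['a','n','t'] then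
        (st.1, st.2.1, st.2.2.1, st.2.2.2 + 1)
      else st)
    (0, 0, 0, 0)
  max (max st.1 st.2.1) st.2.2.1 - st.2.2.2

-- ===== PORT B =====
def antsfunction_alt (ants : String) : Int :=
  let ant : Int := (PySem.Str.count ants "ant" : Int)
  let a : Int := (PySem.Str.count ants "a" : Int) - ant
  let n : Int := (PySem.Str.count ants "n" : Int) - (PySem.Str.count ants "nta" : Int)
  let t : Int := (PySem.Str.count ants "t" : Int) - (PySem.Str.count ants "ta" : Int)
  max (max a n) t - ant

-- ===== PRECONDITION & SPEC =====
def Spec_antsfunction (ants : String) (out : Int) : Prop := out = antsfunction_alt ants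
instance (ants : String) (out : Int) : Decidable (Spec_antsfunction ants out) := by unfold Spec_antsfunction; infer_instance

-- ===== CLAIM (what is proved, stated in full; the proofs are below) =====
def Claim_equal_antsfunction : Prop := ∀ (ants : String), Dom_antsfunction ants → Spec_antsfunction ants (antsfunction ants)

-- ===== LEMMAS AND PROOFS =====

-- number of suffixes (equivalently: start positions) satisfying p
def occB (p : List Char → Bool) : List Char → Nat
  | [] => 0
  | c :: t => (if p (c :: t) then 1 else 0) + occB p t


def qa (u : List Char) : Bool := u.head?.getD ' ' == 'a' && !(['a','n','t'].isPrefixOf u)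

lemma countP_range_drop (p : List Char → Bool) (s : List Char) :
    (List.range s.length).countP (fun i => p (s.drop i)) = occB p s := by
  induction s with
  | nil => simp [occB]
  | cons c t ih =>
    simp only [List.length_cons, List.range_succ_eq_map, List.countP_cons, List.countP_map]
    have : ((List.range t.length).countP ((fun i => p ((c :: t).drop i)) ∘ Nat.succ))
        = (List.range t.length).countP (fun i => p (t.drop i)) := by
      apply List.countP_congr; intro i _; simp
    rw [this, ih]; simp [occB, Nat.add_comm]

lemma occB_count_go (pat : List Char) (hne : pat ≠ [])
    (hstep : ∀ l : List Char, pat <+: l → occB (pat.isPrefixOf ·) l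
        = 1 + occB (pat.isPrefixOf ·) (l.drop pat.length)) :
    ∀ (fuel : Nat) (l : List Char) (acc : Nat), l.length ≤ fuel →
      PySem.Chars.count.go pat fuel l acc = acc + occB (pat.isPrefixOf ·) l := by
  intro fuel
  induction fuel with
  | zero =>
    intro l acc h
    have : l = [] := List.eq_nil_of_length_eq_zero (Nat.le_zero.mp h)
    subst this; simp [PySem.Chars.count.go, occB]
  | succ f ih =>
    intro l acc h
    cases l with
    | nil => simp [PySem.Chars.count.go, occB]
    | cons c t =>
      rw [PySem.Chars.count.go]
      by_cases hp : pat.isPrefixOf (c :: t)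
      · simp only [hp, if_pos]
        have hpre : pat <+: (c :: t) := List.isPrefixOf_iff_prefix.mp hp
        have hlen : ((c :: t).drop pat.length).length ≤ f := by
          have h1 : 1 ≤ pat.length := by
            cases pat with | nil => exact absurd rfl hne | cons _ _ => simp
          simp only [List.length_drop, List.length_cons] at *
          omega
        rw [ih _ _ hlen, hstep _ hpre]
        omega
      · simp only [hp, if_neg, Bool.false_eq_true, not_false_iff]
        rw [ih t acc (by simpa using Nat.le_of_succ_le_succ (by simpa using h))]
        have : occB (pat.isPrefixOf ·) (c :: t) = occB (pat.isPrefixOf ·) t := by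
          simp [occB, hp]
        rw [this]

lemma count_eq_occB (pat : List Char) (hne : pat ≠ [])
    (hstep : ∀ l : List Char, pat <+: l → occB (pat.isPrefixOf ·) l
        = 1 + occB (pat.isPrefixOf ·) (l.drop pat.length)) (s : List Char) :
    PySem.Chars.count s pat = occB (pat.isPrefixOf ·) s := by
  unfold PySem.Chars.count
  have : pat.isEmpty = false := by cases pat with | nil => exact absurd rfl hne | cons _ _ => rfl
  rw [this]
  simpa using occB_count_go pat hne hstep s.length s 0 le_rfl

-- hstep facts for the four patterns used by B
lemma hstep_ant : ∀ l : List Char, ['a','n','t'] <+: l →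
    occB (['a','n','t'].isPrefixOf ·) l = 1 + occB (['a','n','t'].isPrefixOf ·) (l.drop 3) := by
  intro l h
  obtain ⟨r, rfl⟩ := h
  simp [occB, List.isPrefixOf]

lemma hstep_nta : ∀ l : List Char, ['n','t','a'] <+: l →
    occB (['n','t','a'].isPrefixOf ·) l = 1 + occB (['n','t','a'].isPrefixOf ·) (l.drop 3) := by
  intro l h
  obtain ⟨r, rfl⟩ := h
  simp [occB, List.isPrefixOf]

lemma hstep_ta : ∀ l : List Char, ['t','a'] <+: l →
    occB (['t','a'].isPrefixOf ·) l = 1 + occB (['t','a'].isPrefixOf ·) (l.drop 2) := by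
  intro l h
  obtain ⟨r, rfl⟩ := h
  simp [occB, List.isPrefixOf]

lemma hstep_single (c : Char) : ∀ l : List Char, [c] <+: l →
    occB ([c].isPrefixOf ·) l = 1 + occB ([c].isPrefixOf ·) (l.drop 1) := by
  intro l h
  obtain ⟨r, rfl⟩ := h
  simp [occB, List.isPrefixOf]

lemma occB_single (c : Char) (s : List Char) :
    occB ([c].isPrefixOf ·) s = s.count c := by
  induction s with
  | nil => simp [occB]
  | cons d t ih =>
    simp only [occB, List.count_cons, ih, List.isPrefixOf]
    by_cases h : d = c
    · simp [h, Nat.add_comm]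
    · have h1 : (c == d) = false := by simp [BEq.beq]; exact fun e => h e.symm
      have h2 : (d == c) = false := by simp [BEq.beq]; exact h
      simp [h1, h2]

lemma not_isPrefixOf_iff (pat t : List Char) :
    (t.length < pat.length ∨ t.take pat.length ≠ pat) ↔ ¬ (pat.isPrefixOf t = true) := by
  rw [List.isPrefixOf_iff_prefix, List.prefix_iff_eq_take]
  constructor
  · rintro (h | h) he
    · have := congrArg List.length he; simp [List.length_take] at this; omega
    · exact h he.symm
  · intro h
    by_cases hl : t.length < pat.length
    · exact Or.inl hl
    · exact Or.inr fun he => h he.symm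

lemma ptw_a (s : List Char) (i : Nat) (hi : i < s.length) :
    (PySem.List.pyGetD s (i : Int) ' ' = 'a' ∧
      ((i : Int) ≥ (s.length : Int) - 2 ∨
        PySem.List.slice s (some ((i : Int)+1)) (some ((i : Int)+3)) ≠ ['n','t']))
    ↔ qa (s.drop i) = true := by
  have hget : PySem.List.pyGetD s (i : Int) ' ' = (s.drop i).head?.getD ' ' := by
    rw [PySem.List.pyGetD_natCast]
    show (s[i]?).getD ' ' = _
    rw [List.head?_drop]
  have hsl1 : PySem.List.slice s (some ((i : Int)+1)) (some ((i : Int)+3))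
      = ((s.drop i).tail).take 2 := by
    have e1 : ((i : Int)+1) = ((i+1 : Nat) : Int) := by push_cast; ring
    have e3 : ((i : Int)+3) = ((i+3 : Nat) : Int) := by push_cast; ring
    rw [e1, e3, PySem.List.slice_natCast, List.tail_drop]
    congr 1
    omega
  have hge2 : ((i : Int) ≥ (s.length : Int) - 2) ↔ (s.drop i).length ≤ 2 := by
    rw [List.length_drop]; omega
  have hlen0 : 0 < (s.drop i).length := by rw [List.length_drop]; omega
  rw [hget, hsl1, hge2]
  generalize s.drop i = u at hlen0 ⊢
  rcases u with _ | ⟨c, t⟩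
  · simp at hlen0
  · simp only [List.head?_cons, Option.getD_some, List.tail_cons, List.length_cons]
    constructor
    · rintro ⟨rfl, h⟩
      have hnp : ¬ (['n','t'].isPrefixOf t = true) := by
        rw [← not_isPrefixOf_iff]
        rcases h with h | h
        · left; simp; omega
        · right; exact h
      simp [qa, List.isPrefixOf, hnp]
    · intro h
      simp only [qa, Bool.and_eq_true, beq_iff_eq, Bool.not_eq_true'] at h
      obtain ⟨rfl, hp⟩ := h
      refine ⟨rfl, ?_⟩
      have hp' : (['n','t'].isPrefixOf t) = false := by
        simpa [List.isPrefixOf] using hp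
      have : ¬ (['n','t'].isPrefixOf t = true) := by simp [hp']
      rw [← not_isPrefixOf_iff] at this
      rcases this with h | h
      · left; simp at h; omega
      · right; exact h

def qn (u : List Char) : Bool := u.head?.getD ' ' == 'n' && !(['n','t','a'].isPrefixOf u)

lemma ptw_n (s : List Char) (i : Nat) (hi : i < s.length) :
    (¬ (PySem.List.pyGetD s (i : Int) ' ' = 'a' ∧
        ((i : Int) ≥ (s.length : Int) - 2 ∨
          PySem.List.slice s (some ((i : Int)+1)) (some ((i : Int)+3)) ≠ ['n','t'])) ∧
     (PySem.List.pyGetD s (i : Int) ' ' = 'n' ∧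
      ((i : Int) ≥ (s.length : Int) - 2 ∨
        PySem.List.slice s (some ((i : Int)+1)) (some ((i : Int)+3)) ≠ ['t','a'])))
    ↔ qn (s.drop i) = true := by
  have hget : PySem.List.pyGetD s (i : Int) ' ' = (s.drop i).head?.getD ' ' := by
    rw [PySem.List.pyGetD_natCast]
    show (s[i]?).getD ' ' = _
    rw [List.head?_drop]
  have hsl1 : PySem.List.slice s (some ((i : Int)+1)) (some ((i : Int)+3))
      = ((s.drop i).tail).take 2 := by
    have e1 : ((i : Int)+1) = ((i+1 : Nat) : Int) := by push_cast; ring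
    have e3 : ((i : Int)+3) = ((i+3 : Nat) : Int) := by push_cast; ring
    rw [e1, e3, PySem.List.slice_natCast, List.tail_drop]
    congr 1
    omega
  have hge2 : ((i : Int) ≥ (s.length : Int) - 2) ↔ (s.drop i).length ≤ 2 := by
    rw [List.length_drop]; omega
  have hlen0 : 0 < (s.drop i).length := by rw [List.length_drop]; omega
  rw [hget, hsl1, hge2]
  generalize s.drop i = u at hlen0 ⊢
  rcases u with _ | ⟨c, t⟩
  · simp at hlen0
  · simp only [List.head?_cons, Option.getD_some, List.tail_cons, List.length_cons]
    constructor
    · rintro ⟨_, rfl, h⟩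
      have hnp : ¬ (['t','a'].isPrefixOf t = true) := by
        rw [← not_isPrefixOf_iff]
        rcases h with h | h
        · left; simp; omega
        · right; exact h
      simp [qn, List.isPrefixOf, hnp]
    · intro h
      simp only [qn, Bool.and_eq_true, beq_iff_eq, Bool.not_eq_true'] at h
      obtain ⟨rfl, hp⟩ := h
      refine ⟨by rintro ⟨h, -⟩; exact absurd h (by decide), rfl, ?_⟩
      have hp' : (['t','a'].isPrefixOf t) = false := by
        simpa [List.isPrefixOf] using hp
      have : ¬ (['t','a'].isPrefixOf t = true) := by simp [hp']
      rw [← not_isPrefixOf_iff] at this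
      rcases this with h | h
      · left; simp at h; omega
      · right; exact h

def qt (u : List Char) : Bool := u.head?.getD ' ' == 't' && !(['t','a'].isPrefixOf u)

lemma ptw_t (s : List Char) (i : Nat) (hi : i < s.length) :
    (¬ (PySem.List.pyGetD s (i : Int) ' ' = 'a' ∧
        ((i : Int) ≥ (s.length : Int) - 2 ∨
          PySem.List.slice s (some ((i : Int)+1)) (some ((i : Int)+3)) ≠ ['n','t'])) ∧
     ¬ (PySem.List.pyGetD s (i : Int) ' ' = 'n' ∧
        ((i : Int) ≥ (s.length : Int) - 2 ∨
          PySem.List.slice s (some ((i : Int)+1)) (some ((i : Int)+3)) ≠ ['t','a'])) ∧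
     (PySem.List.pyGetD s (i : Int) ' ' = 't' ∧
      ((i : Int) ≥ (s.length : Int) - 1 ∨ PySem.List.pyGetD s ((i : Int)+1) ' ' ≠ 'a')))
    ↔ qt (s.drop i) = true := by
  have hget : PySem.List.pyGetD s (i : Int) ' ' = (s.drop i).head?.getD ' ' := by
    rw [PySem.List.pyGetD_natCast]
    show (s[i]?).getD ' ' = _
    rw [List.head?_drop]
  have hget1 : PySem.List.pyGetD s ((i : Int)+1) ' ' = ((s.drop i).tail).head?.getD ' ' := by
    have e1 : ((i : Int)+1) = ((i+1 : Nat) : Int) := by push_cast; ring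
    rw [e1, PySem.List.pyGetD_natCast]
    show (s[i+1]?).getD ' ' = _
    rw [List.tail_drop, List.head?_drop]
  have hge1 : ((i : Int) ≥ (s.length : Int) - 1) ↔ (s.drop i).length ≤ 1 := by
    rw [List.length_drop]; omega
  have hlen0 : 0 < (s.drop i).length := by rw [List.length_drop]; omega
  rw [hget, hget1, hge1]
  generalize s.drop i = u at hlen0 ⊢
  rcases u with _ | ⟨c, t⟩
  · simp at hlen0
  · simp only [List.head?_cons, Option.getD_some, List.tail_cons, List.length_cons]
    constructor
    · rintro ⟨_, _, rfl, h⟩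
      have hnp : (['t','a'].isPrefixOf ('t'::t)) = false := by
        rcases t with _ | ⟨d, r⟩
        · simp [List.isPrefixOf]
        · rcases h with h | h
          · simp at h
          · simp only [List.head?_cons, Option.getD_some] at h
            have : ('a' == d) = false := by
              simpa using fun e : 'a' = d => h e.symm
            simp [List.isPrefixOf, this]
      simp [qt, hnp]
    · intro h
      simp only [qt, Bool.and_eq_true, beq_iff_eq, Bool.not_eq_true'] at h
      obtain ⟨rfl, hp⟩ := h
      refine ⟨by rintro ⟨h, -⟩; exact absurd h (by decide),
              by rintro ⟨h, -⟩; exact absurd h (by decide), rfl, ?_⟩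
      rcases t with _ | ⟨d, r⟩
      · left; simp
      · right
        simp only [List.head?_cons, Option.getD_some]
        simp [List.isPrefixOf] at hp
        exact fun e => hp e.symm

def qk (u : List Char) : Bool := ['a','n','t'].isPrefixOf u

lemma ptw_k (s : List Char) (i : Nat) (hi : i < s.length) :
    (¬ (PySem.List.pyGetD s (i : Int) ' ' = 'a' ∧
        ((i : Int) ≥ (s.length : Int) - 2 ∨
          PySem.List.slice s (some ((i : Int)+1)) (some ((i : Int)+3)) ≠ ['n','t'])) ∧
     ¬ (PySem.List.pyGetD s (i : Int) ' ' = 'n' ∧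
        ((i : Int) ≥ (s.length : Int) - 2 ∨
          PySem.List.slice s (some ((i : Int)+1)) (some ((i : Int)+3)) ≠ ['t','a'])) ∧
     ¬ (PySem.List.pyGetD s (i : Int) ' ' = 't' ∧
        ((i : Int) ≥ (s.length : Int) - 1 ∨ PySem.List.pyGetD s ((i : Int)+1) ' ' ≠ 'a')) ∧
     ((i : Int) < (s.length : Int) - 2 ∧
      PySem.List.slice s (some (i : Int)) (some ((i : Int)+3)) = ['a','n','t']))
    ↔ qk (s.drop i) = true := by
  have hget : PySem.List.pyGetD s (i : Int) ' ' = (s.drop i).head?.getD ' ' := by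
    rw [PySem.List.pyGetD_natCast]
    show (s[i]?).getD ' ' = _
    rw [List.head?_drop]
  have hget1 : PySem.List.pyGetD s ((i : Int)+1) ' ' = ((s.drop i).tail).head?.getD ' ' := by
    have e1 : ((i : Int)+1) = ((i+1 : Nat) : Int) := by push_cast; ring
    rw [e1, PySem.List.pyGetD_natCast]
    show (s[i+1]?).getD ' ' = _
    rw [List.tail_drop, List.head?_drop]
  have hsl1 : PySem.List.slice s (some ((i : Int)+1)) (some ((i : Int)+3))
      = ((s.drop i).tail).take 2 := by
    have e1 : ((i : Int)+1) = ((i+1 : Nat) : Int) := by push_cast; ring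
    have e3 : ((i : Int)+3) = ((i+3 : Nat) : Int) := by push_cast; ring
    rw [e1, e3, PySem.List.slice_natCast, List.tail_drop]
    congr 1
    omega
  have hsl0 : PySem.List.slice s (some (i : Int)) (some ((i : Int)+3))
      = (s.drop i).take 3 := by
    have e3 : ((i : Int)+3) = ((i+3 : Nat) : Int) := by push_cast; ring
    rw [e3, PySem.List.slice_natCast]
    congr 1
    omega
  have hge2 : ((i : Int) ≥ (s.length : Int) - 2) ↔ (s.drop i).length ≤ 2 := by
    rw [List.length_drop]; omega
  have hge1 : ((i : Int) ≥ (s.length : Int) - 1) ↔ (s.drop i).length ≤ 1 := by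
    rw [List.length_drop]; omega
  have hlt : ((i : Int) < (s.length : Int) - 2) ↔ 3 ≤ (s.drop i).length := by
    rw [List.length_drop]; omega
  have hlen0 : 0 < (s.drop i).length := by rw [List.length_drop]; omega
  rw [hget, hget1, hsl1, hsl0, hge2, hge1, hlt]
  generalize s.drop i = u at hlen0 ⊢
  constructor
  · rintro ⟨-, -, -, h3, htake⟩
    have : ['a','n','t'] <+: u := by
      rw [List.prefix_iff_eq_take]
      simpa using htake.symm
    simpa [qk] using List.isPrefixOf_iff_prefix.mpr this
  · intro h
    have hpre : ['a','n','t'] <+: u := List.isPrefixOf_iff_prefix.mp (by simpa [qk] using h)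
    obtain ⟨r, rfl⟩ := hpre
    refine ⟨?_, ?_, ?_, ?_, ?_⟩
    · rintro ⟨-, hor | hor⟩
      · simp at hor
      · simp at hor
    · rintro ⟨hh, -⟩; simp at hh
    · rintro ⟨hh, -⟩; simp at hh
    · simp
    · simp


-- the 'a' branch counts every 'a' not beginning 'ant' (and similarly for 'n', 't')
lemma occB_qa (s : List Char) : occB qa s + occB qk s = s.count 'a' := by
  induction s with
  | nil => simp [occB]
  | cons c t ih =>
    simp only [occB, List.count_cons]
    have key : ((if qa (c :: t) then 1 else 0) + (if qk (c :: t) then 1 else 0) : Nat)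
        = if (c == 'a') then 1 else 0 := by
      by_cases hc : c = 'a'
      · subst hc
        by_cases hp : ['a','n','t'].isPrefixOf ('a' :: t) <;> simp [qa, qk, hp]
      · have : (c == 'a') = false := by simpa using hc
        have hp : (['a','n','t'].isPrefixOf (c :: t)) = false := by
          simp [List.isPrefixOf]; intro h; exact absurd h.symm hc
        simp [qa, qk, hp, this]
    omega

lemma occB_qn (s : List Char) :
    occB qn s + occB (['n','t','a'].isPrefixOf ·) s = s.count 'n' := by
  induction s with
  | nil => simp [occB]
  | cons c t ih =>
    simp only [occB, List.count_cons]
    have key : ((if qn (c :: t) then 1 else 0)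
        + (if ['n','t','a'].isPrefixOf (c :: t) then 1 else 0) : Nat)
        = if (c == 'n') then 1 else 0 := by
      by_cases hc : c = 'n'
      · subst hc
        by_cases hp : ['n','t','a'].isPrefixOf ('n' :: t) <;> simp [qn, hp]
      · have : (c == 'n') = false := by simpa using hc
        have hp : (['n','t','a'].isPrefixOf (c :: t)) = false := by
          simp [List.isPrefixOf]; intro h; exact absurd h.symm hc
        simp [qn, hp, this]
    omega

lemma occB_qt (s : List Char) :
    occB qt s + occB (['t','a'].isPrefixOf ·) s = s.count 't' := by
  induction s with
  | nil => simp [occB]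
  | cons c t ih =>
    simp only [occB, List.count_cons]
    have key : ((if qt (c :: t) then 1 else 0)
        + (if ['t','a'].isPrefixOf (c :: t) then 1 else 0) : Nat)
        = if (c == 't') then 1 else 0 := by
      by_cases hc : c = 't'
      · subst hc
        by_cases hp : ['t','a'].isPrefixOf ('t' :: t) <;> simp [qt, hp]
      · have : (c == 't') = false := by simpa using hc
        have hp : (['t','a'].isPrefixOf (c :: t)) = false := by
          simp [List.isPrefixOf]; intro h; exact absurd h.symm hc
        simp [qt, hp, this]
    omega

lemma ifchain (P1 P2 P3 P4 : Prop) [Decidable P1] [Decidable P2] [Decidable P3] [Decidable P4]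
    (st : Int × Int × Int × Int) :
    (if P1 then (st.1 + 1, st.2.1, st.2.2.1, st.2.2.2)
     else if P2 then (st.1, st.2.1 + 1, st.2.2.1, st.2.2.2)
     else if P3 then (st.1, st.2.1, st.2.2.1 + 1, st.2.2.2)
     else if P4 then (st.1, st.2.1, st.2.2.1, st.2.2.2 + 1)
     else st)
    = ((if P1 then st.1 + 1 else st.1),
       (if ¬ P1 ∧ P2 then st.2.1 + 1 else st.2.1),
       (if ¬ P1 ∧ ¬ P2 ∧ P3 then st.2.2.1 + 1 else st.2.2.1),
       (if ¬ P1 ∧ ¬ P2 ∧ ¬ P3 ∧ P4 then st.2.2.2 + 1 else st.2.2.2)) := by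
  by_cases h1 : P1 <;> by_cases h2 : P2 <;> by_cases h3 : P3 <;> by_cases h4 : P4 <;>
    simp [h1, h2, h3, h4]

-- split A's if/elif step function into four independent component updates
lemma step_split (s : List Char) :
    (fun (st : Int × Int × Int × Int) (i : Int) =>
      if PySem.List.pyGetD s i ' ' = 'a' ∧
         (i ≥ (s.length : Int) - 2 ∨ PySem.List.slice s (some (i+1)) (some (i+3)) ≠ ['n','t']) then
        (st.1 + 1, st.2.1, st.2.2.1, st.2.2.2)
      else if PySem.List.pyGetD s i ' ' = 'n' ∧
         (i ≥ (s.length : Int) - 2 ∨ PySem.List.slice s (some (i+1)) (some (i+3)) ≠ ['t','a']) then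
        (st.1, st.2.1 + 1, st.2.2.1, st.2.2.2)
      else if PySem.List.pyGetD s i ' ' = 't' ∧
         (i ≥ (s.length : Int) - 1 ∨ PySem.List.pyGetD s (i+1) ' ' ≠ 'a') then
        (st.1, st.2.1, st.2.2.1 + 1, st.2.2.2)
      else if i < (s.length : Int) - 2 ∧ PySem.List.slice s (some i) (some (i+3)) = ['a','n','t'] then
        (st.1, st.2.1, st.2.2.1, st.2.2.2 + 1)
      else st)
    = (fun (st : Int × Int × Int × Int) (i : Int) =>
      ((if PySem.List.pyGetD s i ' ' = 'a' ∧
         (i ≥ (s.length : Int) - 2 ∨ PySem.List.slice s (some (i+1)) (some (i+3)) ≠ ['n','t']) then st.1 + 1 else st.1),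
       (if ¬ (PySem.List.pyGetD s i ' ' = 'a' ∧
         (i ≥ (s.length : Int) - 2 ∨ PySem.List.slice s (some (i+1)) (some (i+3)) ≠ ['n','t'])) ∧
          (PySem.List.pyGetD s i ' ' = 'n' ∧
         (i ≥ (s.length : Int) - 2 ∨ PySem.List.slice s (some (i+1)) (some (i+3)) ≠ ['t','a'])) then st.2.1 + 1 else st.2.1),
       (if ¬ (PySem.List.pyGetD s i ' ' = 'a' ∧
         (i ≥ (s.length : Int) - 2 ∨ PySem.List.slice s (some (i+1)) (some (i+3)) ≠ ['n','t'])) ∧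
          ¬ (PySem.List.pyGetD s i ' ' = 'n' ∧
         (i ≥ (s.length : Int) - 2 ∨ PySem.List.slice s (some (i+1)) (some (i+3)) ≠ ['t','a'])) ∧
          (PySem.List.pyGetD s i ' ' = 't' ∧
         (i ≥ (s.length : Int) - 1 ∨ PySem.List.pyGetD s (i+1) ' ' ≠ 'a')) then st.2.2.1 + 1 else st.2.2.1),
       (if ¬ (PySem.List.pyGetD s i ' ' = 'a' ∧
         (i ≥ (s.length : Int) - 2 ∨ PySem.List.slice s (some (i+1)) (some (i+3)) ≠ ['n','t'])) ∧
          ¬ (PySem.List.pyGetD s i ' ' = 'n' ∧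
         (i ≥ (s.length : Int) - 2 ∨ PySem.List.slice s (some (i+1)) (some (i+3)) ≠ ['t','a'])) ∧
          ¬ (PySem.List.pyGetD s i ' ' = 't' ∧
         (i ≥ (s.length : Int) - 1 ∨ PySem.List.pyGetD s (i+1) ' ' ≠ 'a')) ∧
          (i < (s.length : Int) - 2 ∧ PySem.List.slice s (some i) (some (i+3)) = ['a','n','t']) then st.2.2.2 + 1 else st.2.2.2))) := by
  funext st i
  exact ifchain _ _ _ _ st

-- 4-component version of PySem.List.foldl_prod_mk for A's state tuple
lemma foldl_prod_mk4 {β : Type} (f1 f2 f3 f4 : Int → β → Int) (l : List β) (a b c d : Int) :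
    l.foldl (fun st e => (f1 st.1 e, f2 st.2.1 e, f3 st.2.2.1 e, f4 st.2.2.2 e)) (a, b, c, d)
      = (l.foldl f1 a, l.foldl f2 b, l.foldl f3 c, l.foldl f4 d) := by
  induction l generalizing a b c d with
  | nil => rfl
  | cons x xs ih => simp only [List.foldl_cons, ih]

-- ===== VERDICT (by name: the statement is the Claim_ definition above) =====
theorem antsfunction_spec : Claim_equal_antsfunction := by
  intro ants _
  unfold Spec_antsfunction
  show antsfunction ants = antsfunction_alt ants
  simp only [antsfunction, antsfunction_alt]
  rw [step_split]
  rw [foldl_prod_mk4 (fun (a : Int) (i : Int) => if PySem.List.pyGetD ants.toList i ' ' = 'a' ∧ (i ≥ (ants.toList.length : Int) - 2 ∨ PySem.List.slice ants.toList (some (i+1)) (some (i+3)) ≠ ['n','t']) then a + 1 else a) (fun (a : Int) (i : Int) => if ¬ (PySem.List.pyGetD ants.toList i ' ' = 'a' ∧ (i ≥ (ants.toList.length : Int) - 2 ∨ PySem.List.slice ants.toList (some (i+1)) (some (i+3)) ≠ ['n','t'])) ∧ (PySem.List.pyGetD ants.toList i ' ' = 'n' ∧ (i ≥ (ants.toList.length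 : Int) - 2 ∨ PySem.List.slice ants.toList (some (i+1)) (some (i+3)) ≠ ['t','a'])) then a + 1 else a) (fun (a : Int) (i : Int) => if ¬ (PySem.List.pyGetD ants.toList i ' ' = 'a' ∧ (i ≥ (ants.toList.length : Int) - 2 ∨ PySem.List.slice ants.toList (some (i+1)) (some (i+3)) ≠ ['n','t'])) ∧ ¬ (PySem.List.pyGetD ants.toList i ' ' = 'n' ∧ (i ≥ (ants.toList.length : Int) - 2 ∨ PySem.List.slice ants.toList (some (i+1)) (some (i+3)) ≠ ['t','a'])) ∧ (PySem.List.pyGetD ants.toList i ' ' = 't' ∧ (i ≥ (ants.toList.length : Int) - 1 ∨ PySem.List.pyGetD ants.toList (i+1) ' ' ≠ 'a')) then a + 1 else a) (fun (a : Int) (i : Int) => if ¬ (PySem.List.pyGetD ants.toList i ' ' = 'a' ∧ (i ≥ (ants.toList.length : Int) - 2 ∨ PySem.List.slice ants.toList (some (i+1)) (some (i+3)) ≠ ['n','t'])) ∧ ¬ (PySem.List.pyGetD ants.toList i ' ' = 'n' ∧ (i ≥ (ants.toList.length : Int) - 2 ∨ PySem.List.slice ants.toList (some (i+1)) (some (i+3))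 ≠ ['t','a'])) ∧ ¬ (PySem.List.pyGetD ants.toList i ' ' = 't' ∧ (i ≥ (ants.toList.length : Int) - 1 ∨ PySem.List.pyGetD ants.toList (i+1) ' ' ≠ 'a')) ∧ (i < (ants.toList.length : Int) - 2 ∧ PySem.List.slice ants.toList (some i) (some (i+3)) = ['a','n','t']) then a + 1 else a) (PySem.List.pyRange 0 (ants.toList.length : Int)) 0 0 0 0]
  have hR : PySem.List.pyRange 0 (ants.toList.length : Int)
      = (List.range ants.toList.length).map (fun k : Nat => (k : Int)) :=
    PySem.List.pyRange_zero_natCast _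
  have h1 : List.foldl (fun (a : Int) (i : Int) => if PySem.List.pyGetD ants.toList i ' ' = 'a' ∧ (i ≥ (ants.toList.length : Int) - 2 ∨ PySem.List.slice ants.toList (some (i+1)) (some (i+3)) ≠ ['n','t']) then a + 1 else a) 0 (PySem.List.pyRange 0 (ants.toList.length : Int))
      = ((occB qa ants.toList : Nat) : Int) := by
    rw [PySem.List.foldl_ite_add_one, zero_add, hR, List.countP_map]
    rw [← countP_range_drop qa]
    congr 1
    apply List.countP_congr
    intro i hi
    rw [List.mem_range] at hi
    simp only [Function.comp_apply, decide_eq_true_eq]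
    exact ptw_a ants.toList i hi
  have h2 : List.foldl (fun (a : Int) (i : Int) => if ¬ (PySem.List.pyGetD ants.toList i ' ' = 'a' ∧ (i ≥ (ants.toList.length : Int) - 2 ∨ PySem.List.slice ants.toList (some (i+1)) (some (i+3)) ≠ ['n','t'])) ∧ (PySem.List.pyGetD ants.toList i ' ' = 'n' ∧ (i ≥ (ants.toList.length : Int) - 2 ∨ PySem.List.slice ants.toList (some (i+1)) (some (i+3)) ≠ ['t','a'])) then a + 1 else a) 0 (PySem.List.pyRange 0 (ants.toList.length : Int))
      = ((occB qn ants.toList : Nat) : Int) := by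
    rw [PySem.List.foldl_ite_add_one, zero_add, hR, List.countP_map]
    rw [← countP_range_drop qn]
    congr 1
    apply List.countP_congr
    intro i hi
    rw [List.mem_range] at hi
    simp only [Function.comp_apply, decide_eq_true_eq]
    exact ptw_n ants.toList i hi
  have h3 : List.foldl (fun (a : Int) (i : Int) => if ¬ (PySem.List.pyGetD ants.toList i ' ' = 'a' ∧ (i ≥ (ants.toList.length : Int) - 2 ∨ PySem.List.slice ants.toList (some (i+1)) (some (i+3)) ≠ ['n','t'])) ∧ ¬ (PySem.List.pyGetD ants.toList i ' ' = 'n' ∧ (i ≥ (ants.toList.length : Int) - 2 ∨ PySem.List.slice ants.toList (some (i+1)) (some (i+3)) ≠ ['t','a'])) ∧ (PySem.List.pyGetD ants.toList i ' ' = 't' ∧ (i ≥ (ants.toList.length : Int) - 1 ∨ PySem.List.pyGetD ants.toList (i+1) ' ' ≠ 'a')) then a + 1 else a) 0 (PySem.List.pyRange 0 (ants.toList.length : Int))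
      = ((occB qt ants.toList : Nat) : Int) := by
    rw [PySem.List.foldl_ite_add_one, zero_add, hR, List.countP_map]
    rw [← countP_range_drop qt]
    congr 1
    apply List.countP_congr
    intro i hi
    rw [List.mem_range] at hi
    simp only [Function.comp_apply, decide_eq_true_eq]
    exact ptw_t ants.toList i hi
  have h4 : List.foldl (fun (a : Int) (i : Int) => if ¬ (PySem.List.pyGetD ants.toList i ' ' = 'a' ∧ (i ≥ (ants.toList.length : Int) - 2 ∨ PySem.List.slice ants.toList (some (i+1)) (some (i+3)) ≠ ['n','t'])) ∧ ¬ (PySem.List.pyGetD ants.toList i ' ' = 'n' ∧ (i ≥ (ants.toList.length : Int) - 2 ∨ PySem.List.slice ants.toList (some (i+1)) (some (i+3)) ≠ ['t','a'])) ∧ ¬ (PySem.List.pyGetD ants.toList i ' ' = 't' ∧ (i ≥ (ants.toList.length : Int) - 1 ∨ PySem.List.pyGetD ants.toList (i+1) ' ' ≠ 'a')) ∧ (i < (ants.toList.length : Int) - 2 ∧ PySem.List.slice ants.toList (some i) (some (i+3)) = ['a','n','t']) then a + 1 else a) 0 (PySem.List.pyRange 0 (ants.toList.length : Int))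
      = ((occB qk ants.toList : Nat) : Int) := by
    rw [PySem.List.foldl_ite_add_one, zero_add, hR, List.countP_map]
    rw [← countP_range_drop qk]
    congr 1
    apply List.countP_congr
    intro i hi
    rw [List.mem_range] at hi
    simp only [Function.comp_apply, decide_eq_true_eq]
    exact ptw_k ants.toList i hi
  rw [h1, h2, h3, h4]
  have hq : (List.isPrefixOf ['a','n','t'] ·) = qk := rfl
  have hAnt : (PySem.Str.count ants "ant" : Int) = ((occB qk ants.toList : Nat) : Int) := by
    rw [PySem.Str.count_eq, show "ant".toList = ['a','n','t'] from rfl,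
        count_eq_occB ['a','n','t'] (by simp) hstep_ant, hq]
  have hNta : (PySem.Str.count ants "nta" : Int)
      = ((occB (List.isPrefixOf ['n','t','a'] ·) ants.toList : Nat) : Int) := by
    rw [PySem.Str.count_eq, show "nta".toList = ['n','t','a'] from rfl,
        count_eq_occB ['n','t','a'] (by simp) hstep_nta]
  have hTa : (PySem.Str.count ants "ta" : Int)
      = ((occB (List.isPrefixOf ['t','a'] ·) ants.toList : Nat) : Int) := by
    rw [PySem.Str.count_eq, show "ta".toList = ['t','a'] from rfl,
        count_eq_occB ['t','a'] (by simp) hstep_ta]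
  have hA : (PySem.Str.count ants "a" : Int) = ((ants.toList.count 'a' : Nat) : Int) := by
    rw [PySem.Str.count_eq, show "a".toList = ['a'] from rfl,
        count_eq_occB ['a'] (by simp) (hstep_single 'a'), occB_single]
  have hN : (PySem.Str.count ants "n" : Int) = ((ants.toList.count 'n' : Nat) : Int) := by
    rw [PySem.Str.count_eq, show "n".toList = ['n'] from rfl,
        count_eq_occB ['n'] (by simp) (hstep_single 'n'), occB_single]
  have hT : (PySem.Str.count ants "t" : Int) = ((ants.toList.count 't' : Nat) : Int) := by
    rw [PySem.Str.count_eq, show "t".toList = ['t'] from rfl,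
        count_eq_occB ['t'] (by simp) (hstep_single 't'), occB_single]
  rw [hAnt, hNta, hTa, hA, hN, hT]
  have ra : ((ants.toList.count 'a' : Nat) : Int)
      = ((occB qa ants.toList : Nat) : Int) + ((occB qk ants.toList : Nat) : Int) := by
    have := occB_qa ants.toList; omega
  have rn : ((ants.toList.count 'n' : Nat) : Int)
      = ((occB qn ants.toList : Nat) : Int)
        + ((occB (List.isPrefixOf ['n','t','a'] ·) ants.toList : Nat) : Int) := by
    have := occB_qn ants.toList; omega
  have rt : ((ants.toList.count 't' : Nat) : Int)
      = ((occB qt ants.toList : Nat) : Int)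
        + ((occB (List.isPrefixOf ['t','a'] ·) ants.toList : Nat) : Int) := by
    have := occB_qt ants.toList; omega
  rw [ra, rn, rt]
  simp [add_sub_cancel_right]
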